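-- pv_equiv track=rewrite | github.com/gniewko-d/Laboratory-and-scientific-scripts | EPM_analysis.py | number_of_movement
-- ===== SOURCE A (Python) =====
-- def number_of_movement(data):
--      epi_mobile = 0
--      epi_immobile = 0
--      controller_total_mobile = True
--      controller_total_immobile = True
--      for i,j in enumerate(data["movment_state"]):
--         if j == 1:
--             if controller_total_mobile:
--                 epi_mobile +=1
--                 controller_total_mobile = False
--                 controller_total_immobile = True
--         elif j == 0:
--             if controller_total_immobile:
--                 epi_immobile +=1
--                 controller_total_mobile = True
--                 controller_total_immobile = False
--      return epi_mobile, epi_immobile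
-- ===== SOURCE B (Python) =====
-- def number_of_movement(data):
--     xs = [v for v in data["movment_state"] if v in (0, 1)]
--     starts = xs[:1] + [b for a, b in zip(xs, xs[1:]) if b != a]
--     return starts.count(1), starts.count(0)
-- ===== Notes on version B (the rewrite author's own statement) =====
-- stated objective: idiomatic
-- what changed: B filters the series to its 0/1 entries, builds the list of run starts (first element plus each change point found by zipping the list with its shifted self) and returns the counts of 1s and 0s in it, replacing A's single pass with two boolean controller flags.
import Mathlib
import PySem

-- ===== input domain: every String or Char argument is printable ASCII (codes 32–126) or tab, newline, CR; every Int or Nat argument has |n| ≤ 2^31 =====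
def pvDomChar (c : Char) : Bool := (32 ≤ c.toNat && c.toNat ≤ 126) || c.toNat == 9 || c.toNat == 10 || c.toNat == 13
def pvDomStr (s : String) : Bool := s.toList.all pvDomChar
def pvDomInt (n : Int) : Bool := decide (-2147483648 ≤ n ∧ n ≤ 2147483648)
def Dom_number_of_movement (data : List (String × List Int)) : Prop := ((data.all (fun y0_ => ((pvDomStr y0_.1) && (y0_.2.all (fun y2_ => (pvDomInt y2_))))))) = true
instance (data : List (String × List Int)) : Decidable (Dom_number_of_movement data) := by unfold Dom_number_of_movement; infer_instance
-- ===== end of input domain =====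

-- B collapses the 0/1-filtered sequence to its run starts (first element plus each change point
-- via zip with the shifted list) and counts them, instead of A's stateful controller flags; objective: idiomatic.

-- ===== PORT A =====
-- state = (epi_mobile, epi_immobile, controller_total_mobile, controller_total_immobile)
def number_of_movement (data : List (String × List Int)) : Int × Int :=
  let xs := ((PySem.Dict.mk data).get? "movment_state").getD []
  let s := xs.foldl (fun (st : Int × Int × Bool × Bool) j =>
    if j == 1 then
      if st.2.2.1 then (st.1 + 1, st.2.1, false, true) else st
    else if j == 0 then
      if st.2.2.2 then (st.1, st.2.1 + 1, true, false) else st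
    else st) (0, 0, true, true)
  (s.1, s.2.1)

-- ===== PORT B =====
def number_of_movement_alt (data : List (String × List Int)) : Int × Int :=
  let xs := (((PySem.Dict.mk data).get? "movment_state").getD []).filter (fun v => v == 0 || v == 1)
  let starts := xs.take 1 ++ ((xs.zip (xs.drop 1)).filter (fun p => p.2 != p.1)).map Prod.snd
  ((starts.count 1 : Int), (starts.count 0 : Int))

-- ===== PRECONDITION & SPEC =====
-- A raises KeyError when "movment_state" is absent (B too); exactly those inputs are excluded.
def Pre_number_of_movement (data : List (String × List Int)) : Prop :=
  ((PySem.Dict.mk data).get? "movment_state").isSome = true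
instance (data : List (String × List Int)) : Decidable (Pre_number_of_movement data) := by
  unfold Pre_number_of_movement; infer_instance

def pvWitness_number_of_movement : (List (String × List Int)) := [("movment_state", [1, 0, 0, 2, 1])]

def Spec_number_of_movement (data : List (String × List Int)) (out : Int × Int) : Prop := out = number_of_movement_alt data
instance (data : List (String × List Int)) (out : Int × Int) : Decidable (Spec_number_of_movement data out) := by unfold Spec_number_of_movement; infer_instance

-- ===== CLAIM (what is proved, stated in full; the proofs are below) =====
def Claim_equal_number_of_movement : Prop := ∀ (data : List (String × List Int)), Dom_number_of_movement data → Pre_number_of_movement data → Spec_number_of_movement data (number_of_movement data)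

-- ===== LEMMAS AND PROOFS =====

-- A's loop step, named for the proofs
def pvStep (st : Int × Int × Bool × Bool) (j : Int) : Int × Int × Bool × Bool :=
  if j == 1 then
    if st.2.2.1 then (st.1 + 1, st.2.1, false, true) else st
  else if j == 0 then
    if st.2.2.2 then (st.1, st.2.1 + 1, true, false) else st
  else st

-- counts of run starts of A's machine, recursively
def pvF (xs : List Int) (cm ci : Bool) : Int × Int :=
  match xs with
  | [] => (0, 0)
  | j :: t =>
    if j == 1 then
      if cm then ((pvF t false true).1 + 1, (pvF t false true).2) else pvF t cm ci
    else if j == 0 then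
      if ci then ((pvF t true false).1, (pvF t true false).2 + 1) else pvF t cm ci
    else pvF t cm ci

-- change points of a 0/1 sequence after a previous value
def pvChg (prev : Int) (t : List Int) : List Int :=
  match t with
  | [] => []
  | j :: t' => if j == prev then pvChg prev t' else j :: pvChg j t'

theorem pvFold_eq_pvF (xs : List Int) (em ei : Int) (cm ci : Bool) :
    ((xs.foldl pvStep (em, ei, cm, ci)).1, (xs.foldl pvStep (em, ei, cm, ci)).2.1)
      = (em + (pvF xs cm ci).1, ei + (pvF xs cm ci).2) := by
  induction xs generalizing em ei cm ci with
  | nil => simp [pvF]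
  | cons j t ih =>
    simp only [List.foldl_cons, pvStep, pvF]
    by_cases h1 : j == 1
    · simp only [h1]
      cases cm <;> simp [ih]; ring_nf
    · by_cases h0 : j == 0
      · simp only [h1, h0]
        cases ci <;> simp [ih]; ring_nf
      · simp [h1, h0, ih]

theorem pvF_filter (xs : List Int) (cm ci : Bool) :
    pvF xs cm ci = pvF (xs.filter (fun v => v == 0 || v == 1)) cm ci := by
  induction xs generalizing cm ci with
  | nil => rfl
  | cons j t ih =>
    by_cases h1 : j == 1
    · have : j = 1 := by simpa using h1
      subst this
      simp [pvF, List.filter, ih]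
    · by_cases h0 : j == 0
      · have : j = 0 := by simpa using h0
        subst this
        simp [pvF, List.filter, ih]
      · simp [pvF, List.filter, h0, h1, ih]

theorem pvF_eq_chg_counts : ∀ (t : List Int), (∀ x ∈ t, x = 0 ∨ x = 1) →
    ∀ (prev : Int), prev = 0 ∨ prev = 1 →
    pvF t (prev != 1) (prev != 0)
      = (((pvChg prev t).count 1 : Int), ((pvChg prev t).count 0 : Int)) := by
  intro t
  induction t with
  | nil => intro _ prev _; simp [pvF, pvChg]
  | cons j t' ih =>
    intro ht prev hp
    have ht' : ∀ x ∈ t', x = 0 ∨ x = 1 := fun x hx => ht x (List.mem_cons_of_mem _ hx)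
    have hj := ht j (by simp)
    have h0 := ih ht' 0 (Or.inl rfl)
    have h1 := ih ht' 1 (Or.inr rfl)
    simp only [show ((0:Int) != 1) = true from rfl, show ((0:Int) != 0) = false from rfl,
      show ((1:Int) != 1) = false from rfl, show ((1:Int) != 0) = true from rfl] at h0 h1
    rcases hj with hj | hj <;> rcases hp with hpv | hpv <;> subst hj <;> subst hpv <;>
      simp [pvF, pvChg, h0, h1]

theorem pvChg_eq_zip (t : List Int) (prev : Int) :
    (((prev :: t).zip t).filter (fun p => p.2 != p.1)).map Prod.snd = pvChg prev t := by
  induction t generalizing prev with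
  | nil => rfl
  | cons j t' ih =>
    by_cases h : j = prev
    · subst h
      simp [List.zip_cons_cons, pvChg, ih]
    · have hb : ((prev, j).2 != (prev, j).1) = true := by simp [h]
      simp only [List.zip_cons_cons, List.filter_cons, hb, if_true, List.map_cons, ih j]
      simp [pvChg, show (j == prev) = false from by simpa using h]

-- ===== VERDICT (by name: the statement is the Claim_ definition above) =====
theorem number_of_movement_spec : Claim_equal_number_of_movement := by
  intro data _ _
  unfold Spec_number_of_movement
  have hA : number_of_movement data
      = (0 + (pvF (((PySem.Dict.mk data).get? "movment_state").getD []) true true).1,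
         0 + (pvF (((PySem.Dict.mk data).get? "movment_state").getD []) true true).2) :=
    pvFold_eq_pvF (((PySem.Dict.mk data).get? "movment_state").getD []) 0 0 true true
  have hB : number_of_movement_alt data
      = (((((((PySem.Dict.mk data).get? "movment_state").getD []).filter (fun v => v == 0 || v == 1)).take 1 ++
          ((((((PySem.Dict.mk data).get? "movment_state").getD []).filter (fun v => v == 0 || v == 1)).zip
            (((((PySem.Dict.mk data).get? "movment_state").getD []).filter (fun v => v == 0 || v == 1)).drop 1)).filter
              (fun p => p.2 != p.1)).map Prod.snd).count 1 : Int),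
         ((((((PySem.Dict.mk data).get? "movment_state").getD []).filter (fun v => v == 0 || v == 1)).take 1 ++
          ((((((PySem.Dict.mk data).get? "movment_state").getD []).filter (fun v => v == 0 || v == 1)).zip
            (((((PySem.Dict.mk data).get? "movment_state").getD []).filter (fun v => v == 0 || v == 1)).drop 1)).filter
              (fun p => p.2 != p.1)).map Prod.snd).count 0 : Int)) := rfl
  rw [hA, hB, pvF_filter]
  have hall : ∀ y ∈ (((PySem.Dict.mk data).get? "movment_state").getD []).filter (fun v => v == 0 || v == 1),
      y = 0 ∨ y = 1 := by
    intro y hy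
    have := List.of_mem_filter hy
    simp at this
    tauto
  generalize hys : (((PySem.Dict.mk data).get? "movment_state").getD []).filter (fun v => v == 0 || v == 1) = ys at hall ⊢
  cases ys with
  | nil => simp [pvF]
  | cons a t =>
    have ha : a = 0 ∨ a = 1 := hall a (by simp)
    have ht' : ∀ x ∈ t, x = 0 ∨ x = 1 := fun x hx => hall x (List.mem_cons_of_mem _ hx)
    have hz : (((a :: t).zip t).filter (fun p => p.2 != p.1)).map Prod.snd = pvChg a t :=
      pvChg_eq_zip t a
    have h0 := pvF_eq_chg_counts t ht' 0 (Or.inl rfl)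
    have h1 := pvF_eq_chg_counts t ht' 1 (Or.inr rfl)
    simp only [show ((0:Int) != 1) = true from rfl, show ((0:Int) != 0) = false from rfl,
      show ((1:Int) != 1) = false from rfl, show ((1:Int) != 0) = true from rfl] at h0 h1
    simp only [List.take_succ_cons, List.take_zero, List.drop_succ_cons, List.drop_zero, hz]
    rcases ha with h | h <;> subst h <;>
      simp [pvF, h0, h1]
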